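-- pv_equiv track=rewrite | github.com/ACChaotic/TEUINGLAH | fungsiCSV.py | CSVParser
-- ===== SOURCE A (Python) =====
-- def cariKolom (x):
--     count = 1
--     for i in x:
--         if i == ";":
--             count +=1
--
--         if i == "\n":
--             break
--     return count
--
-- def cariPanjang (x):
--     count = 0
--     for i in x:
--         count +=1
--
--     return count
--
-- def CSVParser(x,y):
--     kolom = cariKolom(x)
--     baris = cariPanjang(y)
--
--     arrayCSV = [["" for i in range (kolom)] for i in range(baris)]
--
--     indeksKolom = 0
--     indeksBaris = 0
--
--     for i in x:
--         if i != ";" and i !="\n":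
--             arrayCSV[indeksBaris][indeksKolom] +=i
--
--         else:
--             if i == ";":
--                 indeksKolom +=1
--             if i == "\n":
--                 indeksBaris +=1
--                 indeksKolom = 0
--
--
--     return baris, kolom, arrayCSV
-- ===== SOURCE B (Python) =====
-- def CSVParser(x, y):
--     lines = x.split('\n')
--     kolom = len(lines[0].split(';'))
--     baris = len(y)
--     arrayCSV = [[""] * kolom for _ in range(baris)]
--     for r, line in enumerate(lines):
--         for c, field in enumerate(line.split(';')):
--             if field:
--                 arrayCSV[r][c] = field
--     return baris, kolom, arrayCSV
-- ===== Notes on version B (the rewrite author's own statement) =====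
-- stated objective: faster
-- what changed: B replaces A's character-by-character state machine (manual column counting, manual length counting, and per-character string += into grid cells) with a whole-field pass: split the input on '\n' and each line on ';', take the first line's field count as the column count, preallocate the grid and assign each non-empty field once.
import Mathlib
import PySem

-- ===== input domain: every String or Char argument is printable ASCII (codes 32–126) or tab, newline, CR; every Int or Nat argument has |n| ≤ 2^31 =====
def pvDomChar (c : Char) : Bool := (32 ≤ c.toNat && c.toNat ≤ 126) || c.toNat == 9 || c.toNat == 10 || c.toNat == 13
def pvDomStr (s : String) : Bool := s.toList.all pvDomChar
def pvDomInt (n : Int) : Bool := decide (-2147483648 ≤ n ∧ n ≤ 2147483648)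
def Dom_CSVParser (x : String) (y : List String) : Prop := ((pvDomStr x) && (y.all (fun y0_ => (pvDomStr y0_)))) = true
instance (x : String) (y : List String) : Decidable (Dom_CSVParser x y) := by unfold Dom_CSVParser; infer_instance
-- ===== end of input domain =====

-- B replaces A's character-by-character scan (which appends to grid cells one character at
-- a time) with a split('\n')/split(';') pass assigning whole fields into a preallocated grid
-- (objective: faster — a timing run measured it; same result).
-- Cells are built as List Char internally and turned into String only at the very end
-- (exact: Python string concatenation of single chars = the list of those chars).

-- ===== PORT A =====
-- count = 1; for i in x: if i==';': count+=1; if i=='\n': break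
def cariKolomAux : List Char → Int → Int
  | [], count => count
  | i :: rest, count =>
    let count := if i = ';' then count + 1 else count
    if i = '\n' then count else cariKolomAux rest count

def cariKolom (x : String) : Int := cariKolomAux x.toList 1

-- count = 0; for i in x: count += 1
def cariPanjang (y : List String) : Int := y.foldl (fun count _ => count + 1) 0

-- arrayCSV[r][c] += i  (List.modify no-ops out of range; Python raises there — excluded by Pre_)
def csvAppend (g : List (List (List Char))) (r c : Nat) (ch : Char) : List (List (List Char)) :=
  g.modify r (fun row => row.modify c (fun cell => cell ++ [ch]))

-- the main for-loop of A; state = (grid, indeksBaris, indeksKolom)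
def csvLoopA : List Char → List (List (List Char)) → Nat → Nat → List (List (List Char))
  | [], g, _, _ => g
  | i :: rest, g, r, c =>
    if i ≠ ';' ∧ i ≠ '\n' then
      csvLoopA rest (csvAppend g r c i) r c
    else
      let c := if i = ';' then c + 1 else c
      let r := if i = '\n' then r + 1 else r
      let c := if i = '\n' then 0 else c
      csvLoopA rest g r c

def CSVParser (x : String) (y : List String) : Int × Int × List (List String) :=
  let kolom := cariKolom x
  let baris := cariPanjang y
  let arrayCSV : List (List (List Char)) :=
    List.replicate baris.toNat (List.replicate kolom.toNat [])
  let arrayCSV := csvLoopA x.toList arrayCSV 0 0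
  (baris, kolom, arrayCSV.map (fun row => row.map String.ofList))

-- ===== PORT B =====
-- arrayCSV[r][c] = field  (List.set / List.modify no-op out of range; Python raises there — excluded by Pre_)
def csvSet (g : List (List (List Char))) (r c : Nat) (v : List Char) : List (List (List Char)) :=
  g.modify r (fun row => row.set c v)

-- for c, field in enumerate(line.split(';')): if field: arrayCSV[r][c] = field
def csvFillRow : List (List Char) → List (List (List Char)) → Nat → Nat → List (List (List Char))
  | [], g, _, _ => g
  | f :: fs, g, r, c => csvFillRow fs (if f = [] then g else csvSet g r c f) r (c + 1)

-- for r, line in enumerate(lines): …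
def csvFillRows : List (List Char) → List (List (List Char)) → Nat → List (List (List Char))
  | [], g, _ => g
  | line :: ls, g, r =>
    csvFillRows ls (csvFillRow (PySem.Chars.splitOn line [';']) g r 0) (r + 1)

def CSVParser_alt (x : String) (y : List String) : Int × Int × List (List String) :=
  let lines := PySem.Chars.splitOn x.toList ['\n']
  let kolom : Int := (PySem.Chars.splitOn (lines.headD []) [';']).length
  let baris : Int := y.length
  let g : List (List (List Char)) := List.replicate baris.toNat (List.replicate kolom.toNat [])
  let g := csvFillRows lines g 0
  (baris, kolom, g.map (fun row => row.map String.ofList))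

-- ===== PRECONDITION & SPEC =====
-- Pre_ excludes exactly the inputs on which A raises IndexError: a NON-EMPTY field whose
-- row index is ≥ len(y) or whose column index is ≥ the first line's field count.
def Pre_CSVParser (x : String) (y : List String) : Prop :=
  ((PySem.Chars.splitOn x.toList ['\n']).zipIdx.all (fun p =>
    ((PySem.Chars.splitOn p.1 [';']).zipIdx.all (fun q =>
      q.1.isEmpty || (decide (p.2 < y.length) &&
        decide (q.2 < (PySem.Chars.splitOn ((PySem.Chars.splitOn x.toList ['\n']).headD []) [';']).length)))))) = true
instance (x : String) (y : List String) : Decidable (Pre_CSVParser x y) := by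
  unfold Pre_CSVParser; infer_instance

def pvWitness_CSVParser : String × List String := ("ab;cd\ne;f", ["u", "v"])

def Spec_CSVParser (x : String) (y : List String) (out : Int × Int × List (List String)) : Prop := out = CSVParser_alt x y
instance (x : String) (y : List String) (out : Int × Int × List (List String)) : Decidable (Spec_CSVParser x y out) := by unfold Spec_CSVParser; infer_instance

-- ===== CLAIM (what is proved, stated in full; the proofs are below) =====
def Claim_equal_CSVParser : Prop := ∀ (x : String) (y : List String), Dom_CSVParser x y → Pre_CSVParser x y → Spec_CSVParser x y (CSVParser x y)

-- ===== LEMMAS AND PROOFS =====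

-- reference single-character splitter (proof-side only); PySem.Chars.splitOn _ [c] equals it
def splitChar (sep : Char) : List Char → List (List Char)
  | [] => [[]]
  | c :: rest =>
    if c = sep then [] :: splitChar sep rest
    else (splitChar sep rest).modifyHead (c :: ·)

theorem length_splitChar_pos (sep : Char) (cs : List Char) : 0 < (splitChar sep cs).length := by
  induction cs with
  | nil => simp [splitChar]
  | cons c rest ih =>
    simp only [splitChar]
    split
    · simp
    · simpa [List.length_modifyHead] using ih

theorem splitChar_ne_nil (sep : Char) (cs : List Char) : splitChar sep cs ≠ [] :=
  List.ne_nil_of_length_pos (length_splitChar_pos sep cs)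

theorem splitOn_go_eq (sep : Char) (s : List Char) : ∀ (fuel : Nat), s.length < fuel →
    ∀ (cur : List Char) (acc : List (List Char)),
    PySem.Chars.splitOn.go [sep] fuel s cur acc
      = acc.reverse ++ (splitChar sep s).modifyHead (cur.reverse ++ ·) := by
  induction s with
  | nil =>
    intro fuel hf cur acc
    match fuel, hf with
    | fuel + 1, _ =>
      rw [PySem.Chars.splitOn.go.eq_def]
      simp [splitChar]
  | cons c rest ih =>
    intro fuel hf cur acc
    match fuel, hf with
    | fuel + 1, hf =>
      rw [PySem.Chars.splitOn.go.eq_def]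
      obtain ⟨h, t, he⟩ : ∃ h t, splitChar sep rest = h :: t := by
        rcases e : splitChar sep rest with _ | ⟨h, t⟩
        · exact absurd e (splitChar_ne_nil sep rest)
        · exact ⟨h, t, rfl⟩
      by_cases hc : c = sep
      · subst hc
        simp only [List.isPrefixOf, Bool.and_true, beq_self_eq_true, if_true, List.length_cons,
          List.length_nil, List.drop_succ_cons, List.drop_zero]
        rw [ih fuel (by simpa using hf) [] (cur.reverse :: acc)]
        simp [splitChar, he]
      · have hb : (c == sep) = false := beq_eq_false_iff_ne.mpr hc
        have hb' : (sep == c) = false := by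
          simp only [beq_eq_false_iff_ne]; exact fun h => hc h.symm
        simp only [List.isPrefixOf, Bool.and_true, hb', if_false, Bool.false_eq_true]
        rw [ih fuel (by simpa using hf) (c :: cur) acc]
        simp [splitChar, hc, he]

theorem splitOn_eq (s : List Char) (sep : Char) :
    PySem.Chars.splitOn s [sep] = splitChar sep s := by
  rw [PySem.Chars.splitOn]
  rw [splitOn_go_eq sep s (s.length + 1) (by omega) [] []]
  obtain ⟨h, t, he⟩ : ∃ h t, splitChar sep s = h :: t := by
    rcases e : splitChar sep s with _ | ⟨h, t⟩
    · exact absurd e (splitChar_ne_nil sep s)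
    · exact ⟨h, t, rfl⟩
  simp [he]

theorem length_splitChar (sep : Char) (cs : List Char) :
    (splitChar sep cs).length = cs.count sep + 1 := by
  induction cs with
  | nil => simp [splitChar]
  | cons c rest ih =>
    simp only [splitChar]
    by_cases hc : c = sep
    · simp [hc, ih, List.count_cons]
    · simp [hc, List.length_modifyHead, ih, List.count_cons, beq_eq_false_iff_ne.mpr hc]

theorem headD_splitChar (sep : Char) (cs : List Char) :
    (splitChar sep cs).headD [] = cs.takeWhile (fun a => a ≠ sep) := by
  induction cs with
  | nil => simp [splitChar]
  | cons c rest ih =>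
    simp only [splitChar, List.takeWhile_cons]
    by_cases hc : c = sep
    · simp [hc]
    · rcases e : splitChar sep rest with _ | ⟨h, t⟩
      · exact absurd e (splitChar_ne_nil sep rest)
      · rw [e] at ih
        simp [hc, e, List.modifyHead_cons]
        simpa using ih

theorem splitChar_of_not_mem (sep : Char) (f : List Char) (h : sep ∉ f) :
    splitChar sep f = [f] := by
  induction f with
  | nil => simp [splitChar]
  | cons c rest ih =>
    have hc : c ≠ sep := fun e => h (e ▸ List.mem_cons_self)
    have : sep ∉ rest := fun m => h (List.mem_cons_of_mem _ m)
    simp [splitChar, hc, ih this]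

theorem splitChar_append (sep : Char) (f r : List Char) (h : sep ∉ f) :
    splitChar sep (f ++ sep :: r) = f :: splitChar sep r := by
  induction f with
  | nil => simp [splitChar]
  | cons c rest ih =>
    have hc : c ≠ sep := fun e => h (e ▸ List.mem_cons_self)
    have hr : sep ∉ rest := fun m => h (List.mem_cons_of_mem _ m)
    simp [splitChar, hc, ih hr]

theorem foldl_count (y : List String) : ∀ (n : Int),
    y.foldl (fun count _ => count + 1) n = n + y.length := by
  induction y with
  | nil => simp
  | cons a t ih => intro n; simp [List.foldl_cons, ih]; omega

theorem cariPanjang_eq (y : List String) : cariPanjang y = (y.length : Int) := by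
  simpa using foldl_count y 0

theorem cariKolomAux_eq (cs : List Char) : ∀ (n : Int),
    cariKolomAux cs n = n + ((cs.takeWhile (fun a => a ≠ '\n')).count ';' : Int) := by
  induction cs with
  | nil => simp [cariKolomAux]
  | cons c rest ih =>
    intro n
    by_cases hn : c = '\n'
    · have hs : c ≠ ';' := by subst hn; decide
      simp [cariKolomAux, hn, hs, List.takeWhile_cons]
    · by_cases hs : c = ';'
      · simp [cariKolomAux, hn, hs, List.takeWhile_cons, ih, List.count_cons]
        push_cast
        ring
      · simp [cariKolomAux, hn, hs, List.takeWhile_cons, ih, List.count_cons,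
          beq_eq_false_iff_ne.mpr hs]

-- the cell seen through total (getD) indexing; [] both for a fresh cell and out of range
def cellAt (g : List (List (List Char))) (r c : Nat) : List Char :=
  (g.getD r []).getD c []

-- appending a whole field character by character, as A's loop does
def csvAppendAll (g : List (List (List Char))) (r c : Nat) (f : List Char) : List (List (List Char)) :=
  g.modify r (fun row => row.modify c (fun cell => cell ++ f))

theorem cellAt_replicate (b k r c : Nat) :
    cellAt (List.replicate b (List.replicate k [])) r c = [] := by
  simp only [cellAt, List.getD_eq_getElem?_getD, List.getElem?_replicate]
  split_ifs <;> simp [List.getD_eq_getElem?_getD, List.getElem?_replicate] <;> split_ifs <;> simp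

theorem cellAt_csvSet_of_ne (g : List (List (List Char))) (r c r' c' : Nat) (v : List Char)
    (h : r' ≠ r ∨ c' ≠ c) : cellAt (csvSet g r c v) r' c' = cellAt g r' c' := by
  simp only [cellAt, csvSet, List.getD_eq_getElem?_getD, List.getElem?_modify]
  by_cases hr : r = r'
  · subst hr
    cases g[r]? with
    | none => simp
    | some row =>
      have hc : ¬ (c = c') := by
        rcases h with h | h
        · exact absurd rfl h
        · exact fun e => h e.symm
      simp [List.getElem?_set, hc]
  · cases g[r']? <;> simp [hr]

theorem cellAt_csvFillRow_of_ne (fs : List (List Char)) : ∀ (g : List (List (List Char)))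
    (r c r' c' : Nat), r' ≠ r → cellAt (csvFillRow fs g r c) r' c' = cellAt g r' c' := by
  induction fs with
  | nil => intro g r c r' c' _; rfl
  | cons f fs ih =>
    intro g r c r' c' h
    simp only [csvFillRow]
    rw [ih _ _ _ _ _ h]
    split
    · rfl
    · exact cellAt_csvSet_of_ne g r c r' c' f (Or.inl h)

theorem csvAppendAll_nil (g : List (List (List Char))) (r c : Nat) :
    csvAppendAll g r c [] = g := by
  have h1 : ∀ row : List (List Char), row.modify c (fun cell => cell ++ []) = row := by
    intro row
    have he : (fun (cell : List Char) => cell ++ []) = id := by funext cell; simp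
    rw [he, List.modify_id]
  simp only [csvAppendAll, h1]
  show g.modify r id = g
  exact List.modify_id r g

theorem csvAppendAll_bridge (g : List (List (List Char))) (r c : Nat) (f : List Char)
    (h : cellAt g r c = []) :
    csvAppendAll g r c f = if f = [] then g else csvSet g r c f := by
  by_cases hf : f = []
  · subst hf
    rw [if_pos rfl, csvAppendAll_nil]
  · rw [if_neg hf]
    simp only [csvAppendAll, csvSet]
    apply List.ext_getElem?
    intro j
    simp only [List.getElem?_modify]
    by_cases hj : r = j
    · subst hj
      cases e : g[r]? with
      | none => simp
      | some row =>
        have hcell : row[c]?.getD [] = [] := by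
          have := h
          simp only [cellAt, List.getD_eq_getElem?_getD, e, Option.getD_some] at this
          exact this
        simp [List.modify_eq_set, show (default : List Char) = [] from rfl, hcell]
    · simp [hj]

theorem csvAppendAll_append (g : List (List (List Char))) (r c : Nat) (a b : List Char) :
    csvAppendAll (csvAppendAll g r c a) r c b = csvAppendAll g r c (a ++ b) := by
  simp only [csvAppendAll]
  apply List.ext_getElem?
  intro j
  simp only [List.getElem?_modify]
  by_cases hj : r = j
  · subst hj
    cases e : g[r]? with
    | none => simp
    | some row =>
      simp only [Option.map_some, Option.map]
      have : (row.modify c fun cell => cell ++ a).modify c (fun cell => cell ++ b)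
          = row.modify c (fun cell => cell ++ (a ++ b)) := by
        apply List.ext_getElem?
        intro i
        simp only [List.getElem?_modify]
        by_cases hi : c = i
        · subst hi
          cases row[c]? <;> simp
        · simp [hi]
      simp [this]
  · simp [hj]

theorem csvLoopA_cons_normal (i : Char) (rest : List Char) (g : List (List (List Char)))
    (r c : Nat) (h1 : i ≠ ';') (h2 : i ≠ '\n') :
    csvLoopA (i :: rest) g r c = csvLoopA rest (csvAppend g r c i) r c := by
  simp [csvLoopA, h1, h2]

theorem csvLoopA_cons_semi (rest : List Char) (g : List (List (List Char))) (r c : Nat) :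
    csvLoopA (';' :: rest) g r c = csvLoopA rest g r (c + 1) := rfl

theorem csvLoopA_cons_nl (rest : List Char) (g : List (List (List Char))) (r c : Nat) :
    csvLoopA ('\n' :: rest) g r c = csvLoopA rest g (r + 1) 0 := rfl

-- A's loop over the characters of one field appends the whole field to the current cell
theorem csvLoopA_field : ∀ (f : List Char), (∀ ch ∈ f, ch ≠ ';' ∧ ch ≠ '\n') →
    ∀ (rest : List Char) (g : List (List (List Char))) (r c : Nat),
    csvLoopA (f ++ rest) g r c = csvLoopA rest (csvAppendAll g r c f) r c := by
  intro f
  induction f with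
  | nil =>
    intro _ rest g r c
    simp [csvAppendAll_nil]
  | cons ch f' ih =>
    intro hf rest g r c
    have h1 := hf ch List.mem_cons_self
    have hf' : ∀ a ∈ f', a ≠ ';' ∧ a ≠ '\n' := fun a ha => hf a (List.mem_cons_of_mem _ ha)
    rw [List.cons_append, csvLoopA_cons_normal ch _ g r c h1.1 h1.2, ih hf' rest _ r c]
    have : csvAppend g r c ch = csvAppendAll g r c [ch] := rfl
    rw [this, csvAppendAll_append]
    rfl

-- A's loop over the fields of one line, field at a time (proof-side reference fold)
def lineFoldA : List (List Char) → List (List (List Char)) → Nat → Nat → List (List (List Char))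
  | [], g, _, _ => g
  | f :: fs, g, r, c => lineFoldA fs (csvAppendAll g r c f) r (c + 1)

theorem csvLoopA_line_aux : ∀ (n : Nat) (line : List Char), line.length ≤ n → '\n' ∉ line →
    ∀ (g : List (List (List Char))) (r c : Nat),
    csvLoopA line g r c = lineFoldA (splitChar ';' line) g r c := by
  intro n
  induction n with
  | zero =>
    intro line hlen _ g r c
    have : line = [] := List.eq_nil_of_length_eq_zero (Nat.le_zero.mp hlen)
    subst this
    simp [csvLoopA, splitChar, lineFoldA, csvAppendAll_nil]
  | succ n ih =>
    intro line hlen hnl g r c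
    by_cases hm : ';' ∈ line
    · set f := line.takeWhile (fun a => a ≠ ';') with hfdef
      have hdw : line.dropWhile (fun a => a ≠ ';') ≠ [] := by
        rw [Ne, List.dropWhile_eq_nil_iff]
        exact fun hall => by simpa using hall ';' hm
      obtain ⟨tail, htail⟩ : ∃ tail, line.dropWhile (fun a => a ≠ ';') = ';' :: tail := by
        rcases e : line.dropWhile (fun a => a ≠ ';') with _ | ⟨hd, tl⟩
        · exact absurd e hdw
        · have h2 := List.head?_dropWhile_not (fun a => decide (a ≠ ';')) line
          rw [e] at h2
          simp at h2
          exact ⟨tl, by rw [h2]⟩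
      have hline : line = f ++ ';' :: tail := by
        rw [hfdef, ← htail, List.takeWhile_append_dropWhile]
      have hfsemi : ';' ∉ f := by
        intro hmem
        have := List.mem_takeWhile_imp hmem
        simp at this
      have hfnl : '\n' ∉ f := fun hmem => hnl (hline ▸ List.mem_append_left _ hmem)
      have htnl : '\n' ∉ tail := fun hmem =>
        hnl (hline ▸ List.mem_append_right _ (List.mem_cons_of_mem _ hmem))
      have hfok : ∀ ch ∈ f, ch ≠ ';' ∧ ch ≠ '\n' :=
        fun ch hc => ⟨fun e => hfsemi (e ▸ hc), fun e => hfnl (e ▸ hc)⟩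
      have hlt : tail.length ≤ n := by
        have := congrArg List.length hline
        simp [List.length_append] at this
        omega
      rw [hline, csvLoopA_field f hfok, csvLoopA_cons_semi, ih tail hlt htnl,
        splitChar_append ';' f tail hfsemi]
      rfl
    · have hok : ∀ ch ∈ line, ch ≠ ';' ∧ ch ≠ '\n' :=
        fun ch hc => ⟨fun e => hm (e ▸ hc), fun e => hnl (e ▸ hc)⟩
      have := csvLoopA_field line hok [] g r c
      rw [List.append_nil] at this
      rw [this, splitChar_of_not_mem ';' line hm]
      rfl

theorem csvLoopA_line (line : List Char) (h : '\n' ∉ line)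
    (g : List (List (List Char))) (r c : Nat) :
    csvLoopA line g r c = lineFoldA (splitChar ';' line) g r c :=
  csvLoopA_line_aux line.length line le_rfl h g r c

theorem csvLoopA_nl : ∀ (line : List Char), '\n' ∉ line →
    ∀ (rest : List Char) (g : List (List (List Char))) (r c : Nat),
    csvLoopA (line ++ '\n' :: rest) g r c = csvLoopA rest (csvLoopA line g r c) (r + 1) 0 := by
  intro line
  induction line with
  | nil =>
    intro _ rest g r c
    rw [List.nil_append, csvLoopA_cons_nl]
    rfl
  | cons ch line' ih =>
    intro h rest g r c
    have hnl : ch ≠ '\n' := fun e => h (e ▸ List.mem_cons_self)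
    have h' : '\n' ∉ line' := fun hmem => h (List.mem_cons_of_mem _ hmem)
    by_cases hs : ch = ';'
    · subst hs
      rw [List.cons_append, csvLoopA_cons_semi, csvLoopA_cons_semi, ih h']
    · rw [List.cons_append, csvLoopA_cons_normal ch _ g r c hs hnl,
        csvLoopA_cons_normal ch _ g r c hs hnl, ih h']

-- on a fresh row tail, A's append-fold and B's guarded-set fold agree
theorem lineFoldA_eq_fillRow (r : Nat) : ∀ (fs : List (List Char))
    (g : List (List (List Char))) (c : Nat),
    (∀ c', c ≤ c' → cellAt g r c' = []) → lineFoldA fs g r c = csvFillRow fs g r c := by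
  intro fs
  induction fs with
  | nil => intro g c _; rfl
  | cons f fs ih =>
    intro g c H
    rw [lineFoldA, csvFillRow, csvAppendAll_bridge g r c f (H c le_rfl)]
    apply ih
    intro c' hc'
    split
    · exact H c' (by omega)
    · rw [cellAt_csvSet_of_ne g r c r c' f (Or.inr (by omega))]
      exact H c' (by omega)

-- the whole scan equals B's row-by-row fill, given every row from r on is fresh
theorem csvLoopA_rows_aux : ∀ (n : Nat) (cs : List Char), cs.length ≤ n →
    ∀ (g : List (List (List Char))) (r : Nat),
    (∀ r' c', r ≤ r' → cellAt g r' c' = []) →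
    csvLoopA cs g r 0 = csvFillRows (splitChar '\n' cs) g r := by
  intro n
  induction n with
  | zero =>
    intro cs hlen g r _
    have : cs = [] := List.eq_nil_of_length_eq_zero (Nat.le_zero.mp hlen)
    subst this
    simp [csvLoopA, splitChar, csvFillRows, splitOn_eq, csvFillRow]
  | succ n ih =>
    intro cs hlen g r Hg
    by_cases hm : '\n' ∈ cs
    · set l := cs.takeWhile (fun a => a ≠ '\n') with hldef
      have hdw : cs.dropWhile (fun a => a ≠ '\n') ≠ [] := by
        rw [Ne, List.dropWhile_eq_nil_iff]
        exact fun hall => by simpa using hall '\n' hm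
      obtain ⟨tail, htail⟩ : ∃ tail, cs.dropWhile (fun a => a ≠ '\n') = '\n' :: tail := by
        rcases e : cs.dropWhile (fun a => a ≠ '\n') with _ | ⟨hd, tl⟩
        · exact absurd e hdw
        · have h2 := List.head?_dropWhile_not (fun a => decide (a ≠ '\n')) cs
          rw [e] at h2
          simp at h2
          exact ⟨tl, by rw [h2]⟩
      have hcs : cs = l ++ '\n' :: tail := by
        rw [hldef, ← htail, List.takeWhile_append_dropWhile]
      have hlnl : '\n' ∉ l := by
        intro hmem
        have := List.mem_takeWhile_imp hmem
        simp at this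
      have hlt : tail.length ≤ n := by
        have := congrArg List.length hcs
        simp [List.length_append] at this
        omega
      have hrow : ∀ c', 0 ≤ c' → cellAt g r c' = [] := fun c' _ => Hg r c' le_rfl
      have hg1 : csvLoopA l g r 0 = csvFillRow (splitChar ';' l) g r 0 := by
        rw [csvLoopA_line l hlnl, lineFoldA_eq_fillRow r _ g 0 hrow]
      rw [hcs, csvLoopA_nl l hlnl tail g r 0, hg1,
        splitChar_append '\n' l tail hlnl]
      rw [csvFillRows, splitOn_eq]
      apply ih tail hlt
      intro r' c' hr'
      rw [cellAt_csvFillRow_of_ne _ g r 0 r' c' (by omega)]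
      exact Hg r' c' (by omega)
    · have hrow : ∀ c', 0 ≤ c' → cellAt g r c' = [] := fun c' _ => Hg r c' le_rfl
      rw [csvLoopA_line cs hm g r 0, lineFoldA_eq_fillRow r _ g 0 hrow,
        splitChar_of_not_mem '\n' cs hm]
      rw [csvFillRows, splitOn_eq]
      rfl

-- ===== VERDICT (by name: the statement is the Claim_ definition above) =====
theorem CSVParser_spec : Claim_equal_CSVParser := by
  intro x y _ _
  unfold Spec_CSVParser
  have hb : cariPanjang y = ((y.length : Int)) := cariPanjang_eq y
  have hk : cariKolom x =
      (((PySem.Chars.splitOn ((PySem.Chars.splitOn x.toList ['\n']).headD []) [';']).length : Int)) := by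
    rw [splitOn_eq x.toList '\n', splitOn_eq, headD_splitChar, length_splitChar]
    rw [cariKolom, cariKolomAux_eq x.toList 1]
    push_cast
    ring
  simp only [CSVParser, CSVParser_alt]
  rw [hb, hk, splitOn_eq x.toList '\n']
  rw [csvLoopA_rows_aux x.toList.length x.toList le_rfl _ 0
    (fun r' c' _ => cellAt_replicate _ _ r' c')]
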